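-- pv_equiv track=rewrite | github.com/lambroz/Jane-Street-Puzzles | FigurineFiguring.py | is_good_comb
-- ===== SOURCE A (Python) =====
-- def is_good_comb(indices, max_count_letter):
--
--     for letter in range(0,11):
--         count = 0
--         for el in indices:
--             if el == letter:
--                 count += 1
--                 if count > max_count_letter[letter]:
--                     return False, letter
--     return True, 0
-- ===== SOURCE B (Python) =====
-- def is_good_comb(indices, max_count_letter):
--     counts = {}
--     for el in indices:
--         counts[el] = counts.get(el, 0) + 1
--     for letter in range(0, 11):
--         if letter in counts and counts[letter] > max_count_letter[letter]:
--             return False, letter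
--     return True, 0
-- ===== Notes on version B (the rewrite author's own statement) =====
-- stated objective: alternative
-- what changed: B replaces A's 11 full scans of indices (one per letter) by a single counting pass building a dict, then one guarded lookup per letter; the 'letter in counts' guard keeps the same max_count_letter accesses as A.
import Mathlib
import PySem

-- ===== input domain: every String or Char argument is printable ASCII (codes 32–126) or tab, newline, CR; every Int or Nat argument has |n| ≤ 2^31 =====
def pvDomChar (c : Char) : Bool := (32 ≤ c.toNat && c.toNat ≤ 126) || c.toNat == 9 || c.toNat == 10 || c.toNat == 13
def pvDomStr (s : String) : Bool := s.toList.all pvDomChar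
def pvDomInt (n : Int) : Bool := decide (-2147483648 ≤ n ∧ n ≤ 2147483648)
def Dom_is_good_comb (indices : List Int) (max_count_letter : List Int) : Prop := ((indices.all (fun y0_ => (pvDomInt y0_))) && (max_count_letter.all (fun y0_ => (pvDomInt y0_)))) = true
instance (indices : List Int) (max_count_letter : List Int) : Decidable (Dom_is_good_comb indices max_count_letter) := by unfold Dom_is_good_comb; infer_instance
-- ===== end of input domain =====

-- ===== PORT A =====
-- header: B builds the letter counts in one dict pass instead of rescanning indices once per letter; return-value equivalence on Pre_ (neither program mutates its arguments).
-- inner loop of A over indices for a fixed letter, with the running count and early return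
def isGoodInnerA (letter : Int) (mcl : List Int) : List Int → Int → Option Int
  | [], _ => none
  | el :: rest, count =>
    if el == letter then
      if count + 1 > PySem.List.pyGetD mcl letter 0 then some letter
      else isGoodInnerA letter mcl rest (count + 1)
    else isGoodInnerA letter mcl rest count

-- outer loop of A over the letters of range(0, 11)
def isGoodOuterA (indices : List Int) (mcl : List Int) : List Int → Bool × Int
  | [] => (true, 0)
  | l :: rest =>
    match isGoodInnerA l mcl indices 0 with
    | some x => (false, x)
    | none => isGoodOuterA indices mcl rest

def is_good_comb (indices : List Int) (max_count_letter : List Int) : Bool × Int :=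
  isGoodOuterA indices max_count_letter (PySem.List.pyRange 0 11 1)

-- ===== PORT B =====
-- second loop of B: per letter, a guarded dict lookup
def isGoodLoopB (counts : PySem.Dict Int Int) (mcl : List Int) : List Int → Bool × Int
  | [] => (true, 0)
  | l :: rest =>
    if counts.contains l && decide (PySem.List.pyGetD mcl l 0 < counts.getD l 0) then (false, l)
    else isGoodLoopB counts mcl rest

def is_good_comb_alt (indices : List Int) (max_count_letter : List Int) : Bool × Int :=
  let counts := indices.foldl (fun d x => d.insert x (d.getD x 0 + 1)) PySem.Dict.empty
  isGoodLoopB counts max_count_letter (PySem.List.pyRange 0 11 1)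

-- ===== PRECONDITION & SPEC =====
-- Pre_ excludes exactly the inputs where A raises IndexError: the letter scan reaches a
-- letter 0..10 occurring in indices whose slot is missing from max_count_letter, with no
-- earlier over-cap letter cutting the scan short.
def Pre_is_good_comb (indices : List Int) (max_count_letter : List Int) : Prop :=
  ∀ l ∈ indices, 0 ≤ l → l ≤ 10 →
    (l < (max_count_letter.length : Int) ∨
      ∃ l' ∈ indices, 0 ≤ l' ∧ l' < l ∧ l' < (max_count_letter.length : Int) ∧
        PySem.List.pyGetD max_count_letter l' 0 < (indices.count l' : Int))
instance (indices : List Int) (max_count_letter : List Int) : Decidable (Pre_is_good_comb indices max_count_letter) := by unfold Pre_is_good_comb; infer_instance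

def pvWitness_is_good_comb : List Int × List Int := ([0, 1, 1], [1, 2])

def Spec_is_good_comb (indices : List Int) (max_count_letter : List Int) (out : Bool × Int) : Prop := out = is_good_comb_alt indices max_count_letter
instance (indices : List Int) (max_count_letter : List Int) (out : Bool × Int) : Decidable (Spec_is_good_comb indices max_count_letter out) := by unfold Spec_is_good_comb; infer_instance

-- ===== CLAIM (what is proved, stated in full; the proofs are below) =====
def Claim_equal_is_good_comb : Prop := ∀ (indices : List Int) (max_count_letter : List Int), Dom_is_good_comb indices max_count_letter → Pre_is_good_comb indices max_count_letter → Spec_is_good_comb indices max_count_letter (is_good_comb indices max_count_letter)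

-- ===== LEMMAS AND PROOFS =====

-- A's inner loop returns some letter iff the letter occurs and its total count exceeds the cap
lemma isGoodInnerA_eq (letter : Int) (mcl : List Int) : ∀ (ind : List Int) (c : Int),
    isGoodInnerA letter mcl ind c =
      if 0 < ind.count letter ∧ PySem.List.pyGetD mcl letter 0 < c + (ind.count letter : Int)
      then some letter else none := by
  intro ind
  induction ind with
  | nil => intro c; simp [isGoodInnerA]
  | cons el rest ih =>
    intro c
    by_cases h : el = letter
    · subst h
      rw [isGoodInnerA]
      simp only [BEq.rfl, if_true, List.count_cons_self, ih (c + 1)]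
      split_ifs with h1 h2 h3 <;> push_cast at * <;> first | rfl | omega
    · rw [isGoodInnerA]
      simp only [beq_iff_eq, h, if_false, List.count_cons_of_ne h, ih c]

-- the two letter loops agree for any letters list
lemma loops_eq (indices mcl : List Int) : ∀ letters : List Int,
    isGoodOuterA indices mcl letters =
      isGoodLoopB (indices.foldl (fun d x => d.insert x (d.getD x 0 + 1)) PySem.Dict.empty) mcl letters := by
  intro letters
  induction letters with
  | nil => rfl
  | cons l rest ih =>
    rw [isGoodOuterA, isGoodLoopB, isGoodInnerA_eq, PySem.Dict.foldl_insert_getD_add_one_eq_counter,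
        PySem.Dict.getD_counter, PySem.Dict.contains_counter]
    rw [PySem.Dict.foldl_insert_getD_add_one_eq_counter] at ih
    by_cases hmem : l ∈ indices
    · have hc : 0 < indices.count l := List.count_pos_iff.mpr hmem
      simp only [zero_add]
      split_ifs with h1 h2 h3 <;> simp_all <;> omega
    · have hc : indices.count l = 0 := List.count_eq_zero.mpr hmem
      simp [hmem, hc, ih]

-- ===== VERDICT (by name: the statement is the Claim_ definition above) =====
theorem is_good_comb_spec : Claim_equal_is_good_comb := by
  intro indices mcl _ _
  unfold Spec_is_good_comb is_good_comb is_good_comb_alt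
  exact loops_eq indices mcl _
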